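-- pv_equiv track=rewrite | github.com/jcabre04/advent-of-code | advent_of_code/year_2015/day_08/run.py | _count_decoded_chars
-- ===== SOURCE A (Python) =====
-- def _count_decoded_chars(line: str) -> int:
--     "Return the number of characters in memory that the line would produce"
--     line = line[1:-1]  # Remove the quotes encapsulating the string
--
--     total = 0
--     idx = 0
--     while idx < len(line):
--         match line[idx : idx + 2]:
--             case r"\\" | r"\"":
--                 idx += 2
--             case r"\x":
--                 idx += 4
--             case _:
--                 idx += 1
--         total += 1
--
--     return total
-- ===== SOURCE B (Python) =====
-- def _count_decoded_chars(line: str) -> int: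
--     "Return the number of characters in memory that the line would produce"
--     # One pass over the characters with a tiny state machine instead of an
--     # index loop with slicing: mode 0 = normal, 1 = just saw a backslash,
--     # 3/2 = skipping the two hex digits of a \xNN escape.
--     total = 0
--     mode = 0
--     for ch in line[1:-1]:
--         if mode == 0:
--             total += 1
--             if ch == '\\':
--                 mode = 1
--         elif mode == 1:
--             if ch == '\\' or ch == '"':
--                 mode = 0
--             elif ch == 'x':
--                 mode = 3
--             else:
--                 total += 1
--                 mode = 0
--         else:
--             mode = 2 if mode == 3 else 0
--     return total
-- ===== Notes on version B (the rewrite author's own statement) =====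
-- stated objective: simpler
-- what changed: Replaces the index-based while loop with two-character slicing and variable-size index jumps by a single left fold over the de-quoted characters driven by a four-state machine (normal / after-backslash / skipping two hex digits), removing per-step slice allocation and string comparison.
import Mathlib
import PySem

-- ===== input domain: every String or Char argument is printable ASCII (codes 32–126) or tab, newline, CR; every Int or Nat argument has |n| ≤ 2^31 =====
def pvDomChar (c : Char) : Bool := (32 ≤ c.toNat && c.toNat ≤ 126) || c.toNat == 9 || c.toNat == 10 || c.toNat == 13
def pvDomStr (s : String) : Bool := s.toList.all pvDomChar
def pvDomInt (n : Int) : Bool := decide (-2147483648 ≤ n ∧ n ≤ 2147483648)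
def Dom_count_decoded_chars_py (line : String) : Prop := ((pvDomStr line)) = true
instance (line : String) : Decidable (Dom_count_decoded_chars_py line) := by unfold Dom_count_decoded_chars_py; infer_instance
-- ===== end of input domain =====

-- B replaces A's index-and-slice while loop by a single left fold with a four-state machine over the characters (same return value, no slicing; A's argument is not mutated).


-- ===== PORT A =====
-- the while loop; idx is always a Nat (starts at 0, only increases), so the Python
-- slice line[idx:idx+2] is exactly (cs.drop idx).take 2 (PySem.List.slice_natCast_add)
def pvAGo (cs : List Char) (idx : Nat) (total : Int) : Int :=
  if idx < cs.length then
    let w := (cs.drop idx).take 2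
    if w = ['\\', '\\'] ∨ w = ['\\', '"'] then pvAGo cs (idx + 2) (total + 1)
    else if w = ['\\', 'x'] then pvAGo cs (idx + 4) (total + 1)
    else pvAGo cs (idx + 1) (total + 1)
  else total
termination_by cs.length - idx

def count_decoded_chars_py (line : String) : Int :=
  -- line = line[1:-1]
  let cs := PySem.List.slice line.toList (some 1) (some (-1))
  pvAGo cs 0 0

-- ===== PORT B =====
-- mode 0 = normal, 1 = just saw a backslash, 3/2 = skipping the two hex digits of \xNN
def pvStep (st : Int × Nat) (ch : Char) : Int × Nat :=
  let (total, mode) := st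
  if mode = 0 then (total + 1, if ch = '\\' then 1 else 0)
  else if mode = 1 then
    if ch = '\\' ∨ ch = '"' then (total, 0)
    else if ch = 'x' then (total, 3)
    else (total + 1, 0)
  else (total, if mode = 3 then 2 else 0)

def count_decoded_chars_py_alt (line : String) : Int :=
  -- for ch in line[1:-1]: ...
  (List.foldl pvStep (0, 0) (PySem.List.slice line.toList (some 1) (some (-1)))).1

-- ===== PRECONDITION & SPEC =====
def Spec_count_decoded_chars_py (line : String) (out : Int) : Prop := out = count_decoded_chars_py_alt line
instance (line : String) (out : Int) : Decidable (Spec_count_decoded_chars_py line out) := by unfold Spec_count_decoded_chars_py; infer_instance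

-- ===== CLAIM (what is proved, stated in full; the proofs are below) =====
def Claim_equal_count_decoded_chars_py : Prop := ∀ (line : String), Dom_count_decoded_chars_py line → Spec_count_decoded_chars_py line (count_decoded_chars_py line)

-- ===== LEMMAS AND PROOFS =====

-- the token count both programs compute on the de-quoted character list
def pvTok : List Char → Int
  | [] => 0
  | '\\' :: c :: rest =>
      if c = '\\' ∨ c = '"' then 1 + pvTok rest
      else if c = 'x' then 1 + pvTok (rest.drop 2)
      else 1 + pvTok (c :: rest)
  | _ :: rest => 1 + pvTok rest
termination_by l => l.length
decreasing_by all_goals (simp [List.length_drop]; try omega)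

theorem pvTok_nil : pvTok [] = 0 := by simp [pvTok]

theorem pvTok_single (a : Char) : pvTok [a] = 1 := by simp [pvTok.eq_def]

theorem pvTok_cons_ne (a : Char) (ha : ¬ a = '\\') (l : List Char) :
    pvTok (a :: l) = 1 + pvTok l := by
  cases l with
  | nil => simp [pvTok.eq_def]
  | cons b r =>
    rw [pvTok.eq_def]
    split <;> simp_all

-- B's fold computes the token count
theorem foldl_pvStep_eq (l : List Char) : ∀ total : Int,
    (List.foldl pvStep (total, 0) l).1 = total + pvTok l := by
  induction l using pvTok.induct with
  | case1 => intro t; simp [pvTok_nil]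
  | case2 c rest h ih =>
    intro t
    simp [List.foldl, pvStep, h, ih, pvTok, add_assoc]
  | case3 rest h ih =>
    intro t
    rcases rest with _ | ⟨a, _ | ⟨b, r⟩⟩
    · simp [List.foldl, pvStep, pvTok, pvTok_nil]
    · simp [List.foldl, pvStep, pvTok]
    · have H := ih (t + 1)
      simp only [List.drop] at H
      simp [List.foldl, pvStep, pvTok, H, add_assoc]
  | case4 c rest h1 h2 ih =>
    intro t
    have hc : ¬ c = '\\' := fun e => h1 (Or.inl e)
    have hq : ¬ c = '"' := fun e => h1 (Or.inr e)
    have H := ih (t + 1)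
    rw [pvTok_cons_ne c hc] at H
    simp [List.foldl, pvStep, hc] at H
    have e : (t : Int) + 1 + 1 = t + 2 := by ring
    rw [e] at H
    simp [List.foldl, pvStep, h2, hc, hq, pvTok, add_assoc]
    rw [H]
    ring
  | case5 a rest hno ih =>
    intro t
    by_cases ha : a = '\\'
    · subst ha
      rcases rest with _ | ⟨b, r⟩
      · simp [List.foldl, pvStep, pvTok_single]
      · exact (hno b r rfl rfl).elim
    · simp [List.foldl, pvStep, ha, ih, pvTok_cons_ne a ha, add_assoc]

-- A's index loop computes the token count of the remaining suffix
theorem pvAGo_eq_aux (n : Nat) : ∀ (cs : List Char) (idx : Nat) (total : Int),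
    cs.length - idx ≤ n → pvAGo cs idx total = total + pvTok (cs.drop idx) := by
  induction n with
  | zero =>
    intro cs idx total h
    have hge : ¬ idx < cs.length := by omega
    rw [pvAGo]
    simp [hge, List.drop_eq_nil_of_le (by omega : cs.length ≤ idx), pvTok_nil]
  | succ n ih =>
    intro cs idx total h
    rw [pvAGo]
    by_cases hlt : idx < cs.length
    · simp only [hlt, if_true]
      have hdl : (cs.drop idx).length = cs.length - idx := by simp
      rcases hd : cs.drop idx with _ | ⟨a, _ | ⟨b, r⟩⟩
      · exfalso; rw [hd] at hdl; simp at hdl; omega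
      · -- exactly one character left
        have h1 : cs.drop (idx + 1) = (cs.drop idx).drop 1 := by
          rw [List.drop_drop, Nat.add_comm]
        have c1 : ¬((List.take 2 [a] : List Char) = ['\\','\\'] ∨ (List.take 2 [a] : List Char) = ['\\','"']) := by simp
        have c2 : (List.take 2 [a] : List Char) ≠ ['\\','x'] := by simp
        rw [if_neg c1, if_neg c2, ih cs (idx + 1) (total + 1) (by omega), h1, hd]
        rw [show ([a] : List Char).drop 1 = [] from rfl, pvTok_nil, pvTok_single]
        ring
      · have ht : (List.take 2 (a :: b :: r) : List Char) = [a, b] := rfl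
        have h1 : cs.drop (idx + 1) = (cs.drop idx).drop 1 := by
          rw [List.drop_drop, Nat.add_comm]
        have h2 : cs.drop (idx + 2) = (cs.drop idx).drop 2 := by
          rw [List.drop_drop, Nat.add_comm]
        have h4 : cs.drop (idx + 4) = (cs.drop idx).drop 4 := by
          rw [List.drop_drop, Nat.add_comm]
        rw [ht]
        by_cases hb1 : ([a,b] : List Char) = ['\\','\\'] ∨ ([a,b] : List Char) = ['\\','"']
        · have hb1' : (a = '\\' ∧ b = '\\') ∨ (a = '\\' ∧ b = '"') := by simpa using hb1
          have ha : a = '\\' := by tauto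
          have hbb : b = '\\' ∨ b = '"' := by tauto
          rw [if_pos hb1, ih cs (idx + 2) (total + 1) (by omega), h2, hd]
          subst ha
          simp [pvTok, hbb, List.drop]
          ring
        · by_cases hb2 : ([a,b] : List Char) = ['\\','x']
          · have hb2' : a = '\\' ∧ b = 'x' := by simpa using hb2
            obtain ⟨ha, hbx⟩ := hb2'
            rw [if_neg hb1, if_pos hb2, ih cs (idx + 4) (total + 1) (by omega), h4, hd]
            subst ha; subst hbx
            simp [pvTok, List.drop]
            ring
          · rw [if_neg hb1, if_neg hb2, ih cs (idx + 1) (total + 1) (by omega), h1, hd]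
            rw [show (a :: b :: r).drop 1 = b :: r from rfl]
            by_cases ha : a = '\\'
            · subst ha
              have hbb : ¬(b = '\\' ∨ b = '"') := by
                rintro (e | e) <;> subst e <;> simp at hb1
              have hbx : ¬ b = 'x' := by intro e; subst e; simp at hb2
              rw [show pvTok ('\\' :: b :: r) = 1 + pvTok (b :: r) from by
                rw [pvTok.eq_def]; simp [hbb, hbx]]
              ring
            · rw [pvTok_cons_ne a ha]
              ring
    · simp only [hlt, if_false]
      have : cs.drop idx = [] := List.drop_eq_nil_of_le (by omega)
      rw [this, pvTok_nil]; ring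

theorem pvAGo_eq (cs : List Char) (idx : Nat) (total : Int) :
    pvAGo cs idx total = total + pvTok (cs.drop idx) :=
  pvAGo_eq_aux (cs.length - idx) cs idx total le_rfl

-- ===== VERDICT (by name: the statement is the Claim_ definition above) =====
theorem count_decoded_chars_py_spec : Claim_equal_count_decoded_chars_py := by
  intro line _
  show count_decoded_chars_py line = count_decoded_chars_py_alt line
  simp [count_decoded_chars_py, count_decoded_chars_py_alt, pvAGo_eq, foldl_pvStep_eq]
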